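-- pv_equiv track=rewrite | github.com/benlagrone/rs-video-stitch | render-api/app/renderer.py | _title_coordinates
-- ===== SOURCE A (Python) =====
-- from typing import Any, Callable, Dict, List, Optional
--
-- def _title_coordinates(position: Optional[str]) -> tuple[str, str]:
--     margin_y = "h*0.08"
--     margin_x = "w*0.08"
--     default_x = "(w-text_w)/2"
--     default_y = margin_y
--
--     if not position:
--         return default_x, default_y
--
--     tokens = (
--         str(position)
--         .strip()
--         .lower()
--         .replace("_", "-")
--         .split("-")
--     )
--     vertical = next((tok for tok in tokens if tok in {"top", "bottom", "middle", "center"}), None)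
--     horizontal = next((tok for tok in tokens if tok in {"left", "right", "middle", "center"}), None)
--
--     if vertical in {"middle", "center"}:
--         y_expr = "(h-text_h)/2"
--     elif vertical == "bottom":
--         y_expr = f"h-text_h-{margin_y}"
--     else:
--         y_expr = default_y
--
--     if horizontal in {"left"}:
--         x_expr = margin_x
--     elif horizontal == "right":
--         x_expr = f"w-text_w-{margin_x}"
--     elif horizontal in {"middle", "center"}:
--         x_expr = default_x
--     else:
--         x_expr = default_x
--
--     return x_expr, y_expr
-- ===== SOURCE B (Python) =====
-- def _title_coordinates(position):
--     margin_y = "h*0.08"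
--     margin_x = "w*0.08"
--     default_x = "(w-text_w)/2"
--     default_y = margin_y
--
--     x_expr, y_expr = default_x, default_y
--     if not position:
--         return x_expr, y_expr
--
--     # Walk the tokens back-to-front, overwriting unconditionally: the earliest
--     # keyword for each axis is written last, so it wins (= A's first-match rule).
--     for tok in reversed(str(position).strip().lower().replace("_", "-").split("-")):
--         if tok in ("middle", "center"):
--             x_expr, y_expr = default_x, "(h-text_h)/2"
--         elif tok == "top":
--             y_expr = default_y
--         elif tok == "bottom":
--             y_expr = f"h-text_h-{margin_y}"
--         elif tok == "left":
--             x_expr = margin_x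
--         elif tok == "right":
--             x_expr = f"w-text_w-{margin_x}"
--     return x_expr, y_expr
-- ===== Notes on version B (the rewrite author's own statement) =====
-- stated objective: simpler
-- what changed: Replaces A's two first-match next() scans plus two if/elif chains by a single reverse walk over the tokens that unconditionally overwrites x/y, so the earliest keyword per axis wins by being written last.
import Mathlib
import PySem

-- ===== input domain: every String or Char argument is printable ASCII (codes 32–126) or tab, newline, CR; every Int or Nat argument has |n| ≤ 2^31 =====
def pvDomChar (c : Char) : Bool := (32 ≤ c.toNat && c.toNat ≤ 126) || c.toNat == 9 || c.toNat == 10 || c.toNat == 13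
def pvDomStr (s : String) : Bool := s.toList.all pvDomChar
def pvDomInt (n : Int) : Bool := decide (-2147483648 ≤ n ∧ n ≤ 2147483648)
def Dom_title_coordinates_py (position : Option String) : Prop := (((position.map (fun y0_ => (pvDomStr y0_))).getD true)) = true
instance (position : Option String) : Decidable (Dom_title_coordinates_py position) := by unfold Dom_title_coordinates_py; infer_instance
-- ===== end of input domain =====

-- B replaces A's two first-match next() scans and if/elif chains by ONE reverse walk of
-- the tokens with unconditional overwrites (earliest keyword written last, so it wins);
-- objective: simpler.

-- shared normalization: str(position).strip().lower().replace("_","-").split("-")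
-- (split? is some because the separator "-" is nonempty, so getD [] is exact)
def pvNormTokens (s : String) : List String :=
  (PySem.Str.split? (PySem.Str.replace (PySem.Str.lower (PySem.Str.strip s)) "_" "-") "-").getD []

-- ===== PORT A =====
def pvIsVert (tok : String) : Bool :=
  tok == "top" || tok == "bottom" || tok == "middle" || tok == "center"

def pvIsHoriz (tok : String) : Bool :=
  tok == "left" || tok == "right" || tok == "middle" || tok == "center"

def title_coordinates_py (position : Option String) : String × String :=
  let margin_y := "h*0.08"
  let margin_x := "w*0.08"
  let default_x := "(w-text_w)/2"
  let default_y := margin_y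
  match position with
  | none => (default_x, default_y)
  | some s =>
    if s = "" then (default_x, default_y)
    else
      let tokens := pvNormTokens s
      let vertical := tokens.find? pvIsVert
      let horizontal := tokens.find? pvIsHoriz
      let y_expr :=
        if vertical = some "middle" ∨ vertical = some "center" then "(h-text_h)/2"
        else if vertical = some "bottom" then "h-text_h-" ++ margin_y
        else default_y
      let x_expr :=
        if horizontal = some "left" then margin_x
        else if horizontal = some "right" then "w-text_w-" ++ margin_x
        else if horizontal = some "middle" ∨ horizontal = some "center" then default_x
        else default_x
      (x_expr, y_expr)

-- ===== PORT B =====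
-- loop body of Source B: overwrite (x_expr, y_expr) according to the current token
def pvStepB (st : String × String) (tok : String) : String × String :=
  if tok = "middle" ∨ tok = "center" then ("(w-text_w)/2", "(h-text_h)/2")
  else if tok = "top" then (st.1, "h*0.08")
  else if tok = "bottom" then (st.1, "h-text_h-" ++ "h*0.08")
  else if tok = "left" then ("w*0.08", st.2)
  else if tok = "right" then ("w-text_w-" ++ "w*0.08", st.2)
  else st

def title_coordinates_py_alt (position : Option String) : String × String :=
  let margin_y := "h*0.08"
  let default_x := "(w-text_w)/2"
  let default_y := margin_y
  match position with
  | none => (default_x, default_y)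
  | some s =>
    if s = "" then (default_x, default_y)
    else (pvNormTokens s).reverse.foldl pvStepB (default_x, default_y)

-- ===== PRECONDITION & SPEC =====
def Spec_title_coordinates_py (position : Option String) (out : String × String) : Prop := out = title_coordinates_py_alt position
instance (position : Option String) (out : String × String) : Decidable (Spec_title_coordinates_py position out) := by unfold Spec_title_coordinates_py; infer_instance

-- ===== CLAIM (what is proved, stated in full; the proofs are below) =====
def Claim_equal_title_coordinates_py : Prop := ∀ (position : Option String), Dom_title_coordinates_py position → Spec_title_coordinates_py position (title_coordinates_py position)

-- ===== LEMMAS AND PROOFS =====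

-- A's y-chain and x-chain as functions of the found tokens
def pvY (v : Option String) : String :=
  if v = some "middle" ∨ v = some "center" then "(h-text_h)/2"
  else if v = some "bottom" then "h-text_h-" ++ "h*0.08"
  else "h*0.08"

def pvX (h : Option String) : String :=
  if h = some "left" then "w*0.08"
  else if h = some "right" then "w-text_w-" ++ "w*0.08"
  else if h = some "middle" ∨ h = some "center" then "(w-text_w)/2"
  else "(w-text_w)/2"

theorem pvFoldr (ts : List String) :
    ts.foldr (fun t acc => pvStepB acc t) ("(w-text_w)/2", "h*0.08")
      = (pvX (ts.find? pvIsHoriz), pvY (ts.find? pvIsVert)) := by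
  induction ts with
  | nil => simp [pvX, pvY]
  | cons t ts ih =>
    rw [List.foldr_cons, ih]
    by_cases h1 : t = "middle"
    · subst h1; simp [pvStepB, pvIsVert, pvIsHoriz, List.find?, pvX, pvY]
    by_cases h2 : t = "center"
    · subst h2; simp [pvStepB, pvIsVert, pvIsHoriz, List.find?, pvX, pvY]
    by_cases h3 : t = "top"
    · subst h3; simp [pvStepB, pvIsVert, pvIsHoriz, List.find?, pvX, pvY]
    by_cases h4 : t = "bottom"
    · subst h4; simp [pvStepB, pvIsVert, pvIsHoriz, List.find?, pvX, pvY]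
    by_cases h5 : t = "left"
    · subst h5; simp [pvStepB, pvIsVert, pvIsHoriz, List.find?, pvX, pvY]
    by_cases h6 : t = "right"
    · subst h6; simp [pvStepB, pvIsVert, pvIsHoriz, List.find?, pvX, pvY]
    · simp [pvStepB, h1, h2, h3, h4, h5, h6, pvIsVert, pvIsHoriz, List.find?,
        show (t == "middle") = false from beq_eq_false_iff_ne.mpr h1,
        show (t == "center") = false from beq_eq_false_iff_ne.mpr h2,
        show (t == "top") = false from beq_eq_false_iff_ne.mpr h3,
        show (t == "bottom") = false from beq_eq_false_iff_ne.mpr h4,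
        show (t == "left") = false from beq_eq_false_iff_ne.mpr h5,
        show (t == "right") = false from beq_eq_false_iff_ne.mpr h6]

-- ===== VERDICT (by name: the statement is the Claim_ definition above) =====
theorem title_coordinates_py_spec : Claim_equal_title_coordinates_py := by
  intro position _
  unfold Spec_title_coordinates_py
  cases position with
  | none => rfl
  | some s =>
    by_cases hs : s = ""
    · simp [title_coordinates_py, title_coordinates_py_alt, hs]
    · simp only [title_coordinates_py, title_coordinates_py_alt, if_neg hs,
        List.foldl_reverse, pvFoldr]
      rfl
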